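-- pv_equiv track=rewrite | github.com/renjmindy/MyNeetcod2024-2025 | CodeSignal/Mastering Algorithms and Data Structures in Python/Finding the Last Unique Element in a String List.py | find_unique_string
-- ===== SOURCE A (Python) =====
-- def find_unique_string(words):
--     # implement this
--     # pass
--     seen, duplicate = set(), set()
--
--     for word in words:
--         if word in seen: duplicate.add(word)
--         else: seen.add(word)
--
--     ans = ''
--
--     for word in reversed(words):
--         if word not in duplicate: ans = word; break
--
--     return ans
-- ===== SOURCE B (Python) =====
-- def find_unique_string(words):
--     # Single forward pass: 'order' (an insertion-ordered dict used as an ordered set)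
--     # holds the words seen exactly once so far; a word is evicted on its second
--     # sighting and remembered in 'dup'. The answer is the last surviving key —
--     # no reverse scan over the input is needed.
--     order = {}
--     dup = set()
--     for w in words:
--         if w in dup:
--             continue
--         if w in order:
--             del order[w]
--             dup.add(w)
--         else:
--             order[w] = True
--     return next(reversed(order), '')
-- ===== Notes on version B (the rewrite author's own statement) =====
-- stated objective: alternative
-- what changed: Replaces A's two staged passes (build a duplicate set, then reverse-scan for the first non-duplicate) by a single forward pass over an insertion-ordered dict of words seen exactly once, evicting a word on its second sighting; the answer is the last surviving key, so no reverse scan over the input exists.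
import Mathlib
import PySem

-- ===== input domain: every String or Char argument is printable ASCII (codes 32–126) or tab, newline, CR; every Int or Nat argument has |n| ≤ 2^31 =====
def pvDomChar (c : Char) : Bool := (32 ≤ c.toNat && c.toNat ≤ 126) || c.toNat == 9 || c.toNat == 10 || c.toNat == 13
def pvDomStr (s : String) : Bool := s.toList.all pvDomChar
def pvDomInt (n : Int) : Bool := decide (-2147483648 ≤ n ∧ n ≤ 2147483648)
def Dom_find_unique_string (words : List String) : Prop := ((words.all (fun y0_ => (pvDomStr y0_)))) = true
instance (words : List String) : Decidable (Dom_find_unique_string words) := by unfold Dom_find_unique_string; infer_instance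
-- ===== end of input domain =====

-- B replaces A's staged passes (duplicate set, then reverse scan) by a single forward pass that
-- keeps the words seen exactly once in order, evicting repeats; the answer is the last survivor.

-- ===== PORT A =====
-- A's second loop: 'for word in reversed(words): if word not in duplicate: ans = word; break'
def pvAScan (duplicate : PySem.Set String) : List String → String
  | [] => ""
  | w :: rest => if PySem.Set.contains duplicate w then pvAScan duplicate rest else w

def find_unique_string (words : List String) : String :=
  let sd := words.foldl
    (fun (p : PySem.Set String × PySem.Set String) word =>
      if PySem.Set.contains p.1 word then (p.1, PySem.Set.add p.2 word)
      else (PySem.Set.add p.1 word, p.2))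
    (PySem.Set.empty, PySem.Set.empty)
  pvAScan sd.2 words.reverse

-- ===== PORT B =====
-- B's loop body: skip known duplicates; evict a key from the ordered dict 'order' on its
-- second sighting; otherwise insert it ('order[w] = True')
def pvBStep (st : PySem.Dict String Bool × PySem.Set String) (w : String) :
    PySem.Dict String Bool × PySem.Set String :=
  if PySem.Set.contains st.2 w then st
  else if PySem.Dict.contains st.1 w then (PySem.Dict.erase st.1 w, PySem.Set.add st.2 w)
  else (PySem.Dict.insert st.1 w true, st.2)

-- 'next(reversed(order), '')' = first key of the reversed key list, default ''
def find_unique_string_alt (words : List String) : String :=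
  let st := words.foldl pvBStep (PySem.Dict.empty, PySem.Set.empty)
  (((PySem.Dict.keys st.1).reverse.head?).getD "")

-- ===== PRECONDITION & SPEC =====
def Spec_find_unique_string (words : List String) (out : String) : Prop := out = find_unique_string_alt words
instance (words : List String) (out : String) : Decidable (Spec_find_unique_string words out) := by unfold Spec_find_unique_string; infer_instance

-- ===== CLAIM (what is proved, stated in full; the proofs are below) =====
def Claim_equal_find_unique_string : Prop := ∀ (words : List String), Dom_find_unique_string words → Spec_find_unique_string words (find_unique_string words)

-- ===== LEMMAS AND PROOFS =====

-- membership in the second accumulator (A's 'duplicate') of the fold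
lemma pv_fold_snd_mem (l : List String) : ∀ (s d : PySem.Set String) (w : String),
    w ∈ (l.foldl
      (fun (p : PySem.Set String × PySem.Set String) word =>
        if PySem.Set.contains p.1 word then (p.1, PySem.Set.add p.2 word)
        else (PySem.Set.add p.1 word, p.2)) (s, d)).2 ↔
      w ∈ d ∨ (w ∈ s ∧ w ∈ l) ∨ 2 ≤ l.count w := by
  induction l with
  | nil => simp
  | cons x l ih =>
    intro s d w
    simp only [List.foldl_cons]
    have hmem : w ∈ l ↔ 1 ≤ l.count w := List.one_le_count_iff.symm
    by_cases hx : PySem.Set.contains s x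
    · have hxs : x ∈ s := by simpa [PySem.Set.contains] using hx
      rw [if_pos hx, ih]
      simp only [PySem.Set.mem_add, List.mem_cons]
      by_cases hwx : w = x
      · subst hwx
        constructor
        · intro _; exact Or.inr (Or.inl ⟨hxs, Or.inl rfl⟩)
        · intro _; exact Or.inl (Or.inr rfl)
      · have hc : (x :: l).count w = l.count w := List.count_cons_of_ne (Ne.symm hwx)
        rw [hc]
        simp only [hwx, or_false]
        tauto
    · rw [if_neg hx, ih]
      have hxs : x ∉ s := by simpa [PySem.Set.contains] using hx
      simp only [PySem.Set.mem_add, List.mem_cons]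
      by_cases hwx : w = x
      · subst hwx
        have hc : (w :: l).count w = l.count w + 1 := List.count_cons_self
        rw [hc, hmem]
        constructor
        · rintro (h | ⟨(hs | _), hl⟩ | h)
          · exact Or.inl h
          · exact absurd hs hxs
          · exact Or.inr (Or.inr (by omega))
          · exact Or.inr (Or.inr (by omega))
        · rintro (h | ⟨hs, _⟩ | h)
          · exact Or.inl h
          · exact absurd hs hxs
          · exact Or.inr (Or.inl ⟨Or.inr rfl, by omega⟩)
      · have hc : (x :: l).count w = l.count w := List.count_cons_of_ne (Ne.symm hwx)
        rw [hc]
        simp only [hwx, or_false]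
        tauto

-- A's duplicate set holds exactly the words occurring at least twice
lemma pv_dup_iff (words : List String) (w : String) :
    w ∈ (words.foldl
      (fun (p : PySem.Set String × PySem.Set String) word =>
        if PySem.Set.contains p.1 word then (p.1, PySem.Set.add p.2 word)
        else (PySem.Set.add p.1 word, p.2))
      (PySem.Set.empty, PySem.Set.empty)).2 ↔ 2 ≤ words.count w := by
  rw [pv_fold_snd_mem]
  simp [PySem.Set.empty]

-- the reverse scan is the first match of the reversed list …
lemma pv_ascan_find (dup : PySem.Set String) (l : List String) :
    pvAScan dup l = ((l.filter (fun w => !PySem.Set.contains dup w)).head?).getD "" := by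
  induction l with
  | nil => rfl
  | cons x l ih =>
    by_cases hx : PySem.Set.contains dup x
    · simp only [pvAScan]
      rw [if_pos hx, ih, List.filter_cons_of_neg (by simpa [PySem.Set.contains] using hx)]
    · simp only [pvAScan]
      rw [if_neg hx, List.filter_cons_of_pos (by simpa [PySem.Set.contains] using hx)]
      rfl

-- … hence the last match of the forward list
lemma pv_A_getLast (words : List String) (dup : PySem.Set String) :
    pvAScan dup words.reverse
      = ((words.filter (fun w => !PySem.Set.contains dup w)).getLast?).getD "" := by
  rw [pv_ascan_find, List.filter_reverse, List.head?_reverse]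

-- loop invariant of B's single pass: the dict's items are prefix.filter (count == 1), keyed
lemma pv_B_inv (l : List String) : ∀ (pre : List String) (d : PySem.Set String),
    (∀ w, PySem.Set.contains d w = true ↔ 2 ≤ pre.count w) →
    (l.foldl pvBStep
        (PySem.Dict.mk ((pre.filter (fun w => pre.count w == 1)).map (fun w => (w, true))), d)).1
      = PySem.Dict.mk (((pre ++ l).filter (fun w => (pre ++ l).count w == 1)).map (fun w => (w, true))) := by
  induction l with
  | nil => intro pre d _; simp
  | cons x l ih =>
    intro pre d hd
    have hxapp : ∀ w, (pre ++ [x]).count w = pre.count w + (if x = w then 1 else 0) := by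
      intro w; simp [List.count_append, List.count_singleton]
    have hxx : (pre ++ [x]).count x = pre.count x + 1 := by rw [hxapp x]; simp
    have hcontains : PySem.Dict.contains
        (PySem.Dict.mk ((pre.filter (fun w => pre.count w == 1)).map (fun w => (w, true)))) x
        = (pre.filter (fun w => pre.count w == 1)).contains x := by
      rw [Bool.eq_iff_iff]
      simp [PySem.Dict.contains, List.any_eq_true, List.any_map, Function.comp_def,
        List.mem_filter]
    simp only [List.foldl_cons]
    by_cases hdx : PySem.Set.contains d x
    · -- known duplicate: state unchanged, filters equal
      have hc2 : 2 ≤ pre.count x := (hd x).mp hdx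
      have hfilter : pre.filter (fun w => pre.count w == 1)
          = (pre ++ [x]).filter (fun w => (pre ++ [x]).count w == 1) := by
        rw [List.filter_append]
        have h1 : [x].filter (fun w => (pre ++ [x]).count w == 1) = [] := by
          rw [List.filter_cons_of_neg (by rw [hxx]; simp; omega)]
          rfl
        rw [h1, List.append_nil]
        refine List.filter_congr ?_
        intro w hw
        rw [hxapp w]
        by_cases hwx : x = w
        · subst hwx; simp; omega
        · simp [hwx]
      have hd' : ∀ w, PySem.Set.contains d w = true ↔ 2 ≤ (pre ++ [x]).count w := by
        intro w; rw [hd w, hxapp w]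
        by_cases hwx : x = w
        · subst hwx; constructor <;> (intro h; omega)
        · simp [hwx]
      rw [pvBStep, if_pos hdx, hfilter]
      have := ih (pre ++ [x]) d hd'
      simpa using this
    · by_cases hmem : (pre.filter (fun w => pre.count w == 1)).contains x
      · -- second sighting: evict x from the dict
        have hxmem : x ∈ pre.filter (fun w => pre.count w == 1) :=
          List.contains_iff_mem.mp hmem
        have hx1 : pre.count x = 1 := by
          have := (List.mem_filter.mp hxmem).2
          simpa using this
        have herase : PySem.Dict.erase
            (PySem.Dict.mk ((pre.filter (fun w => pre.count w == 1)).map (fun w => (w, true)))) x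
            = PySem.Dict.mk (((pre ++ [x]).filter (fun w => (pre ++ [x]).count w == 1)).map (fun w => (w, true))) := by
          have hlist : (pre.filter (fun w => pre.count w == 1)).filter (fun b => b != x)
              = (pre ++ [x]).filter (fun w => (pre ++ [x]).count w == 1) := by
            rw [List.filter_append]
            have h1 : [x].filter (fun w => (pre ++ [x]).count w == 1) = [] := by
              rw [List.filter_cons_of_neg (by rw [hxx, hx1]; simp)]
              rfl
            rw [h1, List.append_nil, List.filter_filter]
            refine List.filter_congr ?_
            intro w hw
            rw [hxapp w]
            by_cases hwx : x = w
            · subst hwx; simp [hx1]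
            · simp [hwx, Ne.symm hwx]
          simp only [PySem.Dict.erase, List.filter_map]
          rw [← hlist]
          congr 1
        have hd' : ∀ w, PySem.Set.contains (PySem.Set.add d x) w = true
            ↔ 2 ≤ (pre ++ [x]).count w := by
          intro w
          rw [hxapp w]
          constructor
          · intro h
            have : w ∈ PySem.Set.add d x := by simpa [PySem.Set.contains] using h
            rcases (PySem.Set.mem_add d x w).mp this with h' | h'
            · have := (hd w).mp (by simpa [PySem.Set.contains] using h'); omega
            · subst h'; simp [hx1]
          · intro h
            by_cases hwx : x = w
            · subst hwx
              have hm := (PySem.Set.mem_add d x x).mpr (Or.inr rfl)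
              simp [PySem.Set.contains, hm]
            · have h2 : 2 ≤ pre.count w := by simp [hwx] at h; exact h
              have hwd : w ∈ d := by
                have := (hd w).mpr h2; simpa [PySem.Set.contains] using this
              simpa [PySem.Set.contains] using (PySem.Set.mem_add d x w).mpr (Or.inl hwd)
        rw [pvBStep, if_neg hdx, if_pos (by rw [hcontains]; exact hmem)]
        simp only
        rw [herase]
        have := ih (pre ++ [x]) (PySem.Set.add d x) hd'
        simpa using this
      · -- first sighting: append (x, true)
        have hx0 : pre.count x = 0 := by
          by_contra h
          have hxin : x ∈ pre := List.one_le_count_iff.mp (by omega)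
          by_cases h1 : pre.count x = 1
          · exact hmem (List.contains_iff_mem.mpr
              (List.mem_filter.mpr ⟨hxin, by simp [h1]⟩))
          · exact hdx ((hd x).mpr (by omega))
        have happ : pre.filter (fun w => pre.count w == 1) ++ [x]
            = (pre ++ [x]).filter (fun w => (pre ++ [x]).count w == 1) := by
          rw [List.filter_append]
          have h1 : [x].filter (fun w => (pre ++ [x]).count w == 1) = [x] := by
            rw [List.filter_cons_of_pos (by rw [hxx, hx0]; simp)]
            rfl
          rw [h1]
          congr 1
          refine List.filter_congr ?_
          intro w hw
          rw [hxapp w]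
          by_cases hwx : x = w
          · subst hwx; exact absurd (List.count_eq_zero.mp hx0) (by simp [hw])
          · simp [hwx]
        have hins : PySem.Dict.insert
            (PySem.Dict.mk ((pre.filter (fun w => pre.count w == 1)).map (fun w => (w, true)))) x true
            = PySem.Dict.mk (((pre ++ [x]).filter (fun w => (pre ++ [x]).count w == 1)).map (fun w => (w, true))) := by
          rw [PySem.Dict.insert, if_neg (by rw [hcontains]; simpa using hmem)]
          rw [← happ]
          simp
        have hd' : ∀ w, PySem.Set.contains d w = true ↔ 2 ≤ (pre ++ [x]).count w := by
          intro w; rw [hd w, hxapp w]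
          by_cases hwx : x = w
          · subst hwx; simp [hx0]
          · simp [hwx]
        rw [pvBStep, if_neg hdx, if_neg (by rw [hcontains]; simpa using hmem)]
        simp only
        rw [hins]
        have := ih (pre ++ [x]) d hd'
        simpa using this

-- B computes the last word of count one
lemma pv_B_getLast (words : List String) :
    find_unique_string_alt words
      = ((words.filter (fun w => words.count w == 1)).getLast?).getD "" := by
  show (((PySem.Dict.keys (words.foldl pvBStep (PySem.Dict.empty, PySem.Set.empty)).1).reverse.head?).getD "") = _
  have h := pv_B_inv words [] PySem.Set.empty
    (by intro w; simp [PySem.Set.contains, PySem.Set.empty])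
  simp only [List.filter_nil, List.map_nil, List.nil_append] at h
  have he : (PySem.Dict.empty : PySem.Dict String Bool) = PySem.Dict.mk [] := rfl
  rw [he, h, List.head?_reverse]
  simp [PySem.Dict.keys, Function.comp_def]

-- ===== VERDICT (by name: the statement is the Claim_ definition above) =====
theorem find_unique_string_spec : Claim_equal_find_unique_string := by
  intro words _
  unfold Spec_find_unique_string
  show pvAScan (words.foldl
      (fun (p : PySem.Set String × PySem.Set String) word =>
        if PySem.Set.contains p.1 word then (p.1, PySem.Set.add p.2 word)
        else (PySem.Set.add p.1 word, p.2))
      (PySem.Set.empty, PySem.Set.empty)).2 words.reverse = _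
  rw [pv_A_getLast, pv_B_getLast]
  have hfil : words.filter (fun w => !PySem.Set.contains (words.foldl
      (fun (p : PySem.Set String × PySem.Set String) word =>
        if PySem.Set.contains p.1 word then (p.1, PySem.Set.add p.2 word)
        else (PySem.Set.add p.1 word, p.2))
      (PySem.Set.empty, PySem.Set.empty)).2 w)
      = words.filter (fun w => words.count w == 1) := by
    refine List.filter_congr ?_
    intro w hw
    have h1 : 1 ≤ words.count w := List.one_le_count_iff.mpr hw
    by_cases h2 : 2 ≤ words.count w
    · have hc : PySem.Set.contains (words.foldl
        (fun (p : PySem.Set String × PySem.Set String) word =>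
          if PySem.Set.contains p.1 word then (p.1, PySem.Set.add p.2 word)
          else (PySem.Set.add p.1 word, p.2))
        (PySem.Set.empty, PySem.Set.empty)).2 w = true := by
        simpa [PySem.Set.contains] using (pv_dup_iff words w).mpr h2
      rw [hc]
      simp; omega
    · have hc : PySem.Set.contains (words.foldl
        (fun (p : PySem.Set String × PySem.Set String) word =>
          if PySem.Set.contains p.1 word then (p.1, PySem.Set.add p.2 word)
          else (PySem.Set.add p.1 word, p.2))
        (PySem.Set.empty, PySem.Set.empty)).2 w = false := by
        have : w ∉ (words.foldl
          (fun (p : PySem.Set String × PySem.Set String) word =>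
            if PySem.Set.contains p.1 word then (p.1, PySem.Set.add p.2 word)
            else (PySem.Set.add p.1 word, p.2))
          (PySem.Set.empty, PySem.Set.empty)).2 :=
          fun hm => h2 ((pv_dup_iff words w).mp hm)
        simpa [PySem.Set.contains] using this
      rw [hc]
      have h3 : words.count w = 1 := by omega
      simp [h3]
  rw [hfil]
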